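-- pv_equiv track=rewrite | github.com/chj3748/TIL | Algorithm/programmers/pg_110 옮기기.py | solution
-- ===== SOURCE A (Python) =====
-- def solution(s):
--     answer = []
--     for snum in s:
--         stack = []
--         cnt = 0
--         for num in snum:
--             if len(stack) >= 2 and num == '0' and stack[-1] == '1' and stack[-2] == '1':
--                 stack.pop()
--                 stack.pop()
--                 cnt += 1
--             else:
--                 stack.append(num)
--         one_cnt = 0
--         while stack:
--             if stack[-1] == '1':
--                 stack.pop()
--                 one_cnt += 1
--             else:
--                 break
--         stack.append('110' * cnt)
--         stack.append('1' * one_cnt)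
--         answer.append(''.join(stack))
--     return answer
-- ===== SOURCE B (Python) =====
-- def solution(s):
--     answer = []
--     for snum in s:
--         # stage 1: repeated global replace until no '110' remains
--         t = snum
--         while True:
--             u = t.replace('110', '')
--             if u == t:
--                 break
--             t = u
--         # stage 2: count of removed patterns from the length drop
--         cnt = (len(snum) - len(t)) // 3
--         # stage 3: insert the removed '110's before the trailing run of 1s
--         k = len(t)
--         while k > 0 and t[k - 1] == '1':
--             k -= 1
--         answer.append(t[:k] + '110' * cnt + '1' * (len(t) - k))
--     return answer
-- ===== Notes on version B (the rewrite author's own statement) =====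
-- stated objective: alternative
-- what changed: Replaces A's single-pass character stack (stack[-1]/stack[-2] collapse plus an end-of-loop while-pop of trailing 1s) by a staged fixpoint computation: repeat str.replace('110','') until it no longer changes the string, recover the collapse count from the total length drop, and splice '110'*cnt in front of the trailing run of 1s; correct because removals of the non-overlapping pattern '110' are confluent, so the replace fixpoint equals A's residual stack.
import Mathlib
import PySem

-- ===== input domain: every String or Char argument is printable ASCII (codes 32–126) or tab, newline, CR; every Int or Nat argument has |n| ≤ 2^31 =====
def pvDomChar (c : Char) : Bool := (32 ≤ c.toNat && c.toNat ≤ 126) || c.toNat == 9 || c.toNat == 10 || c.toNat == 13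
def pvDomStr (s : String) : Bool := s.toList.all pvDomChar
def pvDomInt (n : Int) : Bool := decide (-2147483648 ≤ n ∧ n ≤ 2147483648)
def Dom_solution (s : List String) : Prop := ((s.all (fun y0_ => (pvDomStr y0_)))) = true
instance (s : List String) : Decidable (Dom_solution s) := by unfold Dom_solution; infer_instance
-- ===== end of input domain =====

-- B replaces A's single-pass character stack by a staged computation: iterate str.replace('110','')
-- to a fixpoint, recover the collapse count from the length drop, and splice '110'*cnt before the
-- trailing run of 1s; equal results because removals of the non-overlapping pattern '110' are confluent.

-- shared helper for Python's '110' * cnt / '1' * one_cnt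
def repStr (n : Nat) (s : String) : String := String.ofList (List.replicate n s.toList).flatten

-- ===== PORT A =====
-- A's stack holds single characters during the loop; ported as List Char with the head as the top.
def solStepA (st : List Char) (cnt : Nat) (num : Char) : List Char × Nat :=
  if 2 ≤ st.length ∧ num = '0' ∧ st.head? = some '1' ∧ st.tail.head? = some '1' then
    (st.tail.tail, cnt + 1)
  else (num :: st, cnt)

-- A's end-of-loop while: pop while the top is '1', counting
def solPopOnes : List Char → List Char × Nat
  | [] => ([], 0)
  | c :: r =>
      if c = '1' then
        let p := solPopOnes r
        (p.1, p.2 + 1)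
      else (c :: r, 0)

def solution (s : List String) : List String :=
  s.map (fun snum =>
    let p := snum.toList.foldl (fun (q : List Char × Nat) num => solStepA q.1 q.2 num) ([], 0)
    let e := solPopOnes p.1
    -- stack.append('110'*cnt); stack.append('1'*one_cnt); ''.join(stack)
    String.ofList e.1.reverse ++ repStr p.2 "110" ++ repStr e.2 "1")

-- ===== PORT B =====
-- The next five lemmas exist only so that normB's termination (decreasing_by) can cite remNeLt:
-- remAll is a characterisation of one t.replace('110','') pass, and a changed replace output is shorter.
def remAll : List Char → List Char
  | '1' :: '1' :: '0' :: r => remAll r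
  | c :: r => c :: remAll r
  | [] => []

theorem remAll_le (t : List Char) : (remAll t).length ≤ t.length := by
  fun_induction remAll t with
  | case1 r ih => simp; omega
  | case2 c r _ ih => simp; omega
  | case3 => simp

theorem remAll_cons (c : Char) (t : List Char) (h : ¬ ['1','1','0'] <+: (c :: t)) :
    remAll (c :: t) = c :: remAll t := by
  rw [remAll.eq_def]
  split
  · rename_i r heq
    exact absurd ⟨r, heq.symm⟩ h
  · rename_i c' r hne heq
    cases heq; rfl
  · rename_i heq; cases heq

theorem replace_eq_remAll_go (fuel : Nat) (l acc : List Char) (h : l.length ≤ fuel) :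
    PySem.Chars.replace.go ['1','1','0'] [] fuel l acc = acc.reverse ++ remAll l := by
  induction fuel generalizing l acc with
  | zero =>
      have : l = [] := List.length_eq_zero_iff.mp (Nat.le_antisymm h (Nat.zero_le _))
      subst this; simp [PySem.Chars.replace.go, remAll]
  | succ fuel ih =>
      cases l with
      | nil => simp [PySem.Chars.replace.go, remAll]
      | cons c t =>
          rw [PySem.Chars.replace.go]
          by_cases hp : List.isPrefixOf ['1','1','0'] (c :: t) = true
          · obtain ⟨r, hr⟩ : ∃ r, c :: t = '1' :: '1' :: '0' :: r := by
              rcases (List.isPrefixOf_iff_prefix.mp hp) with ⟨r, hr⟩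
              exact ⟨r, hr.symm⟩
            rw [if_pos hp]
            have hlen : r.length ≤ fuel := by
              have := congrArg List.length hr; simp at this h; omega
            rw [hr]
            simpa [remAll] using ih r acc hlen
          · rw [if_neg hp]
            rw [remAll_cons c t (fun hpre => hp (List.isPrefixOf_iff_prefix.mpr hpre))]
            have := ih t (c :: acc) (by simp at h; omega)
            simp [this]

theorem replace_eq_remAll (t : List Char) :
    PySem.Chars.replace t ['1','1','0'] [] = remAll t := by
  rw [PySem.Chars.replace]
  simp [replace_eq_remAll_go t.length t [] (le_refl _)]

theorem remAll_lt_or_eq (t : List Char) : (remAll t).length < t.length ∨ remAll t = t := by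
  fun_induction remAll t with
  | case1 r ih => left; have := remAll_le r; simp; omega
  | case2 c r hne ih =>
      rcases ih with hlt | heq
      · left; simp; omega
      · right; rw [heq]
  | case3 => right; rfl

theorem remNeLt (t : List Char) (h : ¬ PySem.Chars.replace t ['1','1','0'] [] = t) :
    (PySem.Chars.replace t ['1','1','0'] []).length < t.length := by
  rw [replace_eq_remAll] at h ⊢
  rcases remAll_lt_or_eq t with hlt | heq
  · exact hlt
  · exact absurd heq h

-- Source B's inner 'while True: u = t.replace('110',''); if u == t: break; t = u' fixpoint loop
def normB (t : List Char) : List Char :=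
  let u := PySem.Chars.replace t ['1','1','0'] []
  if h : u = t then t else normB u
termination_by t.length
decreasing_by exact remNeLt t h

-- Source B's 'while k > 0 and t[k-1] == '1': k -= 1' (t[k-1] is in-range there: 1 ≤ k ≤ len(t), so getD is exact)
def trailK (t : List Char) (k : Nat) : Nat :=
  if 0 < k ∧ t.getD (k - 1) ' ' = '1' then trailK t (k - 1) else k
termination_by k
decreasing_by omega

def solution_alt (s : List String) : List String :=
  s.map (fun snum =>
    let t := normB snum.toList
    let cnt := (snum.toList.length - t.length) / 3
    let k := trailK t t.length
    -- t[:k] with 0 ≤ k ≤ len(t) is take k (exact)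
    String.ofList (t.take k) ++ repStr cnt "110" ++ repStr (t.length - k) "1")

-- ===== PRECONDITION & SPEC =====
def Spec_solution (s : List String) (out : List String) : Prop := out = solution_alt s
instance (s : List String) (out : List String) : Decidable (Spec_solution s out) := by unfold Spec_solution; infer_instance

-- ===== CLAIM (what is proved, stated in full; the proofs are below) =====
def Claim_equal_solution : Prop := ∀ (s : List String), Dom_solution s → Spec_solution s (solution s)

-- ===== LEMMAS AND PROOFS =====

-- scanning '1','1','0' from any state pops nothing else and bumps the counter
theorem foldA_110 (v : List Char) (st : List Char) (cnt : Nat) :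
    List.foldl (fun (q : List Char × Nat) num => solStepA q.1 q.2 num) (st, cnt) ('1' :: '1' :: '0' :: v)
      = List.foldl (fun (q : List Char × Nat) num => solStepA q.1 q.2 num) (st, cnt + 1) v := by
  simp [List.foldl, solStepA]

-- the final stack of A's scan does not depend on the running counter
theorem foldA_fst_cnt (t : List Char) : ∀ (st : List Char) (cnt cnt' : Nat),
    (List.foldl (fun (q : List Char × Nat) num => solStepA q.1 q.2 num) (st, cnt) t).1
      = (List.foldl (fun (q : List Char × Nat) num => solStepA q.1 q.2 num) (st, cnt') t).1 := by
  induction t with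
  | nil => intro st cnt cnt'; rfl
  | cons c t ih =>
      intro st cnt cnt'
      simp only [List.foldl, solStepA]
      by_cases hc : 2 ≤ st.length ∧ c = '0' ∧ st.head? = some '1' ∧ st.tail.head? = some '1'
      · rw [if_pos hc, if_pos hc]; exact ih _ _ _
      · rw [if_neg hc, if_neg hc]; exact ih _ _ _

-- one replace pass does not change the final stack of A's scan
theorem foldA_remAll (t : List Char) : ∀ (st : List Char) (cnt : Nat),
    (List.foldl (fun (q : List Char × Nat) num => solStepA q.1 q.2 num) (st, cnt) t).1
      = (List.foldl (fun (q : List Char × Nat) num => solStepA q.1 q.2 num) (st, cnt) (remAll t)).1 := by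
  fun_induction remAll t with
  | case1 r ih =>
      intro st cnt
      rw [foldA_110]
      rw [ih st (cnt + 1)]
      exact foldA_fst_cnt (remAll r) st (cnt + 1) cnt
  | case2 c r hne ih =>
      intro st cnt
      simp only [List.foldl]
      exact ih _ _
  | case3 => intro st cnt; rfl

-- counter invariant of A's scan: 3·cnt + |stack| is preserved plus one per char
theorem foldA_inv (t : List Char) : ∀ (st : List Char) (cnt : Nat),
    3 * (List.foldl (fun (q : List Char × Nat) num => solStepA q.1 q.2 num) (st, cnt) t).2
      + (List.foldl (fun (q : List Char × Nat) num => solStepA q.1 q.2 num) (st, cnt) t).1.length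
      = 3 * cnt + st.length + t.length := by
  induction t with
  | nil => intro st cnt; simp
  | cons c t ih =>
      intro st cnt
      simp only [List.foldl]
      by_cases hc : 2 ≤ st.length ∧ c = '0' ∧ st.head? = some '1' ∧ st.tail.head? = some '1'
      · rw [solStepA, if_pos hc]
        have h2 := hc.1
        have := ih st.tail.tail (cnt + 1)
        rw [this]
        have : st.tail.tail.length = st.length - 2 := by simp; omega
        simp; omega
      · rw [solStepA, if_neg hc]
        have := ih (c :: st) cnt
        rw [this]
        simp; omega

-- A's scan over a 110-free string just pushes everything
theorem foldA_no110 (t : List Char) : ∀ (u : List Char) (cnt : Nat),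
    ¬ (['1','1','0'] <:+: (u ++ t)) →
    List.foldl (fun (q : List Char × Nat) num => solStepA q.1 q.2 num) (u.reverse, cnt) t
      = ((u ++ t).reverse, cnt) := by
  induction t with
  | nil => intro u cnt h; simp
  | cons c t ih =>
      intro u cnt h
      simp only [List.foldl]
      have hstep : solStepA u.reverse cnt c = (c :: u.reverse, cnt) := by
        rw [solStepA, if_neg]
        rintro ⟨hlen, hc, h1, h2⟩
        subst hc
        obtain ⟨w, hw⟩ : ∃ w, u.reverse = '1' :: '1' :: w := by
          cases hu : u.reverse with
          | nil => rw [hu] at h1; simp at h1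
          | cons a r =>
              cases hr : r with
              | nil => rw [hu, hr] at h2; simp at h2
              | cons b r' =>
                  rw [hu] at h1; rw [hu, hr] at h2
                  simp at h1 h2
                  exact ⟨r', by rw [h1, h2]⟩
        apply h
        have hu : u = w.reverse ++ ['1', '1'] := by
          have := congrArg List.reverse hw
          simpa using this
        exact ⟨w.reverse, t, by rw [hu]; simp⟩
      rw [hstep]
      have : c :: u.reverse = (u ++ [c]).reverse := by simp
      rw [this]
      have := ih (u ++ [c]) cnt (by simpa using h)
      rw [this]; simp

-- normB reaches a replace fixpoint
theorem normB_fix (t : List Char) : remAll (normB t) = normB t := by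
  fun_induction normB t with
  | case1 t u h => rw [← replace_eq_remAll]; exact h
  | case2 t u h ih => exact ih

-- the fixpoint is 110-free
theorem remAll_lt_of_infix (n : List Char) (hinf : ['1','1','0'] <:+: n) :
    (remAll n).length < n.length := by
  fun_induction remAll n with
  | case1 r ih => have := remAll_le r; simp; omega
  | case2 c r hne ih =>
      rcases List.infix_cons_iff.mp hinf with hpre | hinf'
      · rcases hpre with ⟨w, hw⟩
        have he := hw.symm
        simp at he
        exact absurd he.2 (fun h2 => hne w he.1 h2)
      · simpa using ih hinf'
  | case3 => simp at hinf

theorem normB_no110 (t : List Char) : ¬ (['1','1','0'] <:+: normB t) := by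
  intro hinf
  have hlt := remAll_lt_of_infix (normB t) hinf
  rw [normB_fix] at hlt
  omega

-- iterating replace to the fixpoint does not change A's final stack
theorem foldA_normB (t : List Char) : ∀ (st : List Char) (cnt : Nat),
    (List.foldl (fun (q : List Char × Nat) num => solStepA q.1 q.2 num) (st, cnt) t).1
      = (List.foldl (fun (q : List Char × Nat) num => solStepA q.1 q.2 num) (st, cnt) (normB t)).1 := by
  fun_induction normB t with
  | case1 t u h => intro st cnt; rfl
  | case2 t u h ih =>
      intro st cnt
      rw [foldA_remAll t st cnt, ← replace_eq_remAll]
      exact ih st cnt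

-- popping the trailing run of ones (A's while loop) from a stack replicate j '1' ++ rest
theorem solPopOnes_replicate (ones : Nat) (rest : List Char) (h : rest.head? ≠ some '1') :
    solPopOnes (List.replicate ones '1' ++ rest) = (rest, ones) := by
  induction ones with
  | zero =>
      simp only [List.replicate, List.nil_append]
      cases rest with
      | nil => rfl
      | cons c r =>
          rw [solPopOnes]
          rw [if_neg (by simpa using h)]
  | succ n ih =>
      simp only [List.replicate_succ, List.cons_append]
      rw [solPopOnes, if_pos rfl, ih]

-- B's index loop finds the start of the trailing run of ones
theorem trailK_spec (j : Nat) : ∀ (m rest t : List Char),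
    t = m ++ List.replicate j '1' ++ rest → (m = [] ∨ m.getLast? ≠ some '1') →
    trailK t (m.length + j) = m.length := by
  induction j with
  | zero =>
      intro m rest t ht hm
      simp only [List.replicate_zero, List.append_nil] at ht
      have hneg : ¬ (0 < m.length + 0 ∧ t.getD (m.length + 0 - 1) ' ' = '1') := by
        rintro ⟨hpos, hlast⟩
        rcases hm with hm | hm
        · subst hm; simp at hpos
        · apply hm
          have hlen0 : m.length - 1 < m.length := by simp at hpos; omega
          subst ht
          simp only [List.getD, Nat.add_zero] at hlast
          rw [List.getElem?_append_left hlen0, List.getElem?_eq_getElem hlen0] at hlast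
          simp at hlast
          rw [List.getLast?_eq_getElem?, List.getElem?_eq_getElem hlen0, hlast]
      rw [trailK, if_neg hneg]
      omega
  | succ j ih =>
      intro m rest t ht hm
      have hpos : 0 < m.length + (j + 1) ∧ t.getD (m.length + (j + 1) - 1) ' ' = '1' := by
        refine ⟨by omega, ?_⟩
        have hidx : m.length + (j + 1) - 1 = (m ++ List.replicate j '1').length := by simp
        rw [hidx, ht, List.replicate_succ']
        simp only [List.getD]
        rw [show m ++ (List.replicate j '1' ++ ['1']) ++ rest
              = (m ++ List.replicate j '1') ++ ('1' :: rest) by simp]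
        rw [List.getElem?_append_right (le_refl _)]
        simp
      rw [trailK, if_pos hpos]
      have harr : m.length + (j + 1) - 1 = m.length + j := by omega
      rw [harr]
      exact ih m ('1' :: rest) t (by rw [ht, List.replicate_succ']; simp) hm

-- ===== VERDICT (by name: the statement is the Claim_ definition above) =====
theorem solution_spec : Claim_equal_solution := by
  intro s _
  unfold Spec_solution solution solution_alt
  apply List.map_congr_left
  intro snum _
  dsimp only
  set l := snum.toList with hl
  set n := normB l with hn
  -- trailing-ones decomposition of n
  set j := (n.reverse.takeWhile (· == '1')).length with hj
  set m := (n.reverse.dropWhile (· == '1')).reverse with hmdef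
  have htake : n.reverse.takeWhile (· == '1') = List.replicate j '1' := by
    rw [List.eq_replicate_iff]
    refine ⟨rfl, fun b hb => ?_⟩
    have := List.mem_takeWhile_imp hb
    simpa using this
  have hdecomp : n = m ++ List.replicate j '1' := by
    have h1 : n.reverse = List.replicate j '1' ++ m.reverse := by
      rw [hmdef, List.reverse_reverse, ← htake, List.takeWhile_append_dropWhile]
    have := congrArg List.reverse h1
    simpa using this
  have hmhead : m.reverse.head? ≠ some '1' := by
    rw [hmdef, List.reverse_reverse]
    intro hh
    have := List.head?_dropWhile_not (· == '1') n.reverse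
    rw [hh] at this
    simp at this
  have hmlast : m = [] ∨ m.getLast? ≠ some '1' := by
    right
    rw [← List.head?_reverse]
    exact hmhead
  have hnofix : ¬ (['1','1','0'] <:+: n) := by rw [hn]; exact normB_no110 l
  set p := List.foldl (fun (q : List Char × Nat) num => solStepA q.1 q.2 num) ([], 0) l with hp
  have hstack : p.1 = n.reverse := by
    rw [hp, foldA_normB l [] 0, ← hn]
    have h0 := foldA_no110 n [] 0 (by simpa using hnofix)
    simp only [List.reverse_nil, List.nil_append] at h0
    rw [h0]
  have hinv := foldA_inv l [] 0
  rw [← hp] at hinv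
  have hplen : p.1.length = n.length := by rw [hstack]; simp
  have hcnt : p.2 = (l.length - n.length) / 3 := by
    simp only [List.length_nil] at hinv
    omega
  have hpop : solPopOnes p.1 = (m.reverse, j) := by
    rw [hstack, hdecomp]
    rw [show (m ++ List.replicate j '1').reverse = List.replicate j '1' ++ m.reverse by simp]
    exact solPopOnes_replicate j m.reverse hmhead
  have hnlen : n.length = m.length + j := by rw [hdecomp]; simp
  have hk : trailK n n.length = m.length := by
    rw [hnlen]
    exact trailK_spec j m [] n (by rw [hdecomp]; simp) hmlast
  rw [hpop, hk, hcnt]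
  simp only [List.reverse_reverse]
  rw [show n.take m.length = m by rw [hdecomp]; exact List.take_left]
  rw [show n.length - m.length = j by omega]
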